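-- pv_equiv track=rewrite | github.com/anilshah18-prog/my-numerology-app | app.py | reduce_number_with_steps
-- ===== SOURCE A (Python) =====
-- def reduce_number_with_steps(n):
--     steps = []
--     current = n
--     while current > 9:
--         digits = [int(d) for d in str(current)]
--         steps.append(f"{' + '.join(map(str, digits))} = {sum(digits)}")
--         current = sum(digits)
--     return current, steps
-- ===== SOURCE B (Python) =====
-- def reduce_number_with_steps(n):
--     # Recursive decomposition: base case returns (value, []); the step list is
--     # built front-to-back on the way out of the recursion instead of via a
--     # mutated accumulator in a while loop.
--     if n <= 9:
--         return n, []
--     digits = [int(d) for d in str(n)]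
--     s = sum(digits)
--     step = f"{' + '.join(map(str, digits))} = {s}"
--     value, rest = reduce_number_with_steps(s)
--     return value, [step] + rest
-- ===== Notes on version B (the rewrite author's own statement) =====
-- stated objective: simpler
-- what changed: Replaced the while loop that mutates a steps accumulator with a direct recursion whose base case returns (n, []) and which conses each step string onto the recursive result.
import Mathlib
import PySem

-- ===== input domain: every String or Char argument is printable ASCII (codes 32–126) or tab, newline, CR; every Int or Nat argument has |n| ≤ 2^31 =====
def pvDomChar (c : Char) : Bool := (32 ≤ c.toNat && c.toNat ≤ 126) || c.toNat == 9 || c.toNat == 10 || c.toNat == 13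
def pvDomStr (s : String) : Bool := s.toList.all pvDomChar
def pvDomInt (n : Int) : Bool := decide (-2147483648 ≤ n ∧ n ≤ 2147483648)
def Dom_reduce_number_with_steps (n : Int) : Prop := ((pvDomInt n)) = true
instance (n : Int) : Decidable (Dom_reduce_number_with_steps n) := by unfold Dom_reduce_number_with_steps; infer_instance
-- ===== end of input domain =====

-- B replaces A's while loop with a mutated steps accumulator by a direct recursion
-- that conses each step string onto the recursive result (same values, simpler shape).

-- [int(d) for d in str(current)]: current is > 9 here, so str(current) is all
-- decimal digits and int(d) is exactly the digit value (exact on that domain).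
def pvDigits (current : Int) : List Int :=
  (PySem.Int.toChars current).map (fun c => ((c.toNat : Int) - 48))

-- f"{' + '.join(map(str, digits))} = {sum(digits)}"
def pvStep (digits : List Int) : String :=
  PySem.Str.join " + " (digits.map PySem.Int.toStr) ++ " = " ++ PySem.Int.toStr digits.sum

-- ===== PORT A =====
-- the while loop; the fuel argument only makes it total (n.toNat + 1 ≥ the number
-- of iterations on every input: each iteration with current > 9 shrinks current)
def pvLoopA : Nat → Int → List String → Int × List String
  | 0, current, steps => (current, steps)
  | fuel + 1, current, steps =>
    if current > 9 then
      let digits := pvDigits current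
      pvLoopA fuel digits.sum (steps ++ [pvStep digits])
    else (current, steps)

def reduce_number_with_steps (n : Int) : Int × List String :=
  pvLoopA (n.toNat + 1) n []

-- ===== PORT B =====
-- the recursion from Source B, with the same totality fuel
def pvRecB : Nat → Int → Int × List String
  | 0, n => (n, [])
  | fuel + 1, n =>
    if n ≤ 9 then (n, [])
    else
      let digits := pvDigits n
      let s := digits.sum
      let step := pvStep digits
      let vr := pvRecB fuel s
      (vr.1, step :: vr.2)

def reduce_number_with_steps_alt (n : Int) : Int × List String :=
  pvRecB (n.toNat + 1) n

-- ===== PRECONDITION & SPEC =====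
def Spec_reduce_number_with_steps (n : Int) (out : Int × List String) : Prop := out = reduce_number_with_steps_alt n
instance (n : Int) (out : Int × List String) : Decidable (Spec_reduce_number_with_steps n out) := by unfold Spec_reduce_number_with_steps; infer_instance

-- ===== CLAIM (what is proved, stated in full; the proofs are below) =====
def Claim_equal_reduce_number_with_steps : Prop := ∀ (n : Int), Dom_reduce_number_with_steps n → Spec_reduce_number_with_steps n (reduce_number_with_steps n)

-- ===== LEMMAS AND PROOFS =====
-- loop/recursion correspondence: the loop threads the accumulated steps, the
-- recursion returns its steps, and appending relates the two, for any fuel.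
theorem pvLoopA_eq_recB (fuel : Nat) :
    ∀ (current : Int) (steps : List String),
      pvLoopA fuel current steps = ((pvRecB fuel current).1, steps ++ (pvRecB fuel current).2) := by
  induction fuel with
  | zero => intro current steps; simp [pvLoopA, pvRecB]
  | succ f ih =>
    intro current steps
    by_cases h : current > 9
    · have h' : ¬ current ≤ 9 := by omega
      simp [pvLoopA, pvRecB, h, h', ih]
    · have h' : current ≤ 9 := by omega
      simp [pvLoopA, pvRecB, h, h']

-- ===== VERDICT (by name: the statement is the Claim_ definition above) =====
theorem reduce_number_with_steps_spec : Claim_equal_reduce_number_with_steps := by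
  intro n _
  unfold Spec_reduce_number_with_steps reduce_number_with_steps reduce_number_with_steps_alt
  simp [pvLoopA_eq_recB]
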